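-- pv_equiv track=rewrite | github.com/srinivxs/phismail | backend/app/workers/scoring_worker.py | _get_feature_category
-- ===== SOURCE A (Python) =====
-- def _get_feature_category(feature_name: str) -> str:
--     """Map feature name to category."""
--
--     categories = {
--         "email_header": [
--             "spf_pass", "dkim_pass", "dmarc_pass", "reply_to_mismatch",
--             "return_path_mismatch", "sender_domain_mismatch", "originating_ip_present",
--             "num_received_headers", "smtp_hops", "ip_private_network",
--         ],
--         "url_structural": [
--             "url_length", "num_dots", "num_subdomains", "num_hyphens",
--             "num_special_chars", "contains_ip_address", "contains_at_symbol",
--             "num_query_parameters", "url_entropy_score", "num_fragments",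
--             "has_https", "url_shortened",
--         ],
--         "url_obfuscation": [
--             "percent_encoding_count", "hex_encoding_count", "double_slash_redirect",
--             "encoded_characters_ratio", "username_in_url", "mixed_case_domain",
--             "long_query_string",
--         ],
--         "threat_intelligence": [
--             "openphish_match", "phishtank_match", "urlhaus_match",
--             "domain_blacklisted", "ip_blacklisted", "threat_confidence_score",
--         ],
--         "nlp": [
--             "urgency_keyword_count", "credential_request_keywords",
--             "financial_request_keywords", "security_alert_keywords",
--             "threat_language_score", "sentiment_score", "imperative_language_score",
--         ],
--         "brand_impersonation": [
--             "brand_keyword_present", "brand_domain_similarity_score",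
--             "brand_typosquat_distance", "brand_homograph_detected",
--         ],
--         "attachment_risk": [
--             "attachment_count", "has_executable_attachment",
--             "has_script_attachment", "has_macro_document",
--             "double_extension_detected", "archive_with_executable",
--             "mime_mismatch_detected",
--         ],
--     }
--
--     for category, features in categories.items():
--         if feature_name in features:
--             return category
--
--     return "other"
-- ===== SOURCE B (Python) =====
-- # Flat inverted table written as a literal: feature name -> category.
-- # One direct dict lookup replaces the scan over per-category lists.
-- _FEATURE_TO_CATEGORY = {
--     "spf_pass": "email_header",
--     "dkim_pass": "email_header",
--     "dmarc_pass": "email_header",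
--     "reply_to_mismatch": "email_header",
--     "return_path_mismatch": "email_header",
--     "sender_domain_mismatch": "email_header",
--     "originating_ip_present": "email_header",
--     "num_received_headers": "email_header",
--     "smtp_hops": "email_header",
--     "ip_private_network": "email_header",
--     "url_length": "url_structural",
--     "num_dots": "url_structural",
--     "num_subdomains": "url_structural",
--     "num_hyphens": "url_structural",
--     "num_special_chars": "url_structural",
--     "contains_ip_address": "url_structural",
--     "contains_at_symbol": "url_structural",
--     "num_query_parameters": "url_structural",
--     "url_entropy_score": "url_structural",
--     "num_fragments": "url_structural",
--     "has_https": "url_structural",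
--     "url_shortened": "url_structural",
--     "percent_encoding_count": "url_obfuscation",
--     "hex_encoding_count": "url_obfuscation",
--     "double_slash_redirect": "url_obfuscation",
--     "encoded_characters_ratio": "url_obfuscation",
--     "username_in_url": "url_obfuscation",
--     "mixed_case_domain": "url_obfuscation",
--     "long_query_string": "url_obfuscation",
--     "openphish_match": "threat_intelligence",
--     "phishtank_match": "threat_intelligence",
--     "urlhaus_match": "threat_intelligence",
--     "domain_blacklisted": "threat_intelligence",
--     "ip_blacklisted": "threat_intelligence",
--     "threat_confidence_score": "threat_intelligence",
--     "urgency_keyword_count": "nlp",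
--     "credential_request_keywords": "nlp",
--     "financial_request_keywords": "nlp",
--     "security_alert_keywords": "nlp",
--     "threat_language_score": "nlp",
--     "sentiment_score": "nlp",
--     "imperative_language_score": "nlp",
--     "brand_keyword_present": "brand_impersonation",
--     "brand_domain_similarity_score": "brand_impersonation",
--     "brand_typosquat_distance": "brand_impersonation",
--     "brand_homograph_detected": "brand_impersonation",
--     "attachment_count": "attachment_risk",
--     "has_executable_attachment": "attachment_risk",
--     "has_script_attachment": "attachment_risk",
--     "has_macro_document": "attachment_risk",
--     "double_extension_detected": "attachment_risk",
--     "archive_with_executable": "attachment_risk",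
--     "mime_mismatch_detected": "attachment_risk",
-- }
--
--
-- def _get_feature_category(feature_name: str) -> str:
--     """Map feature name to category."""
--     return _FEATURE_TO_CATEGORY.get(feature_name, "other")
-- ===== Notes on version B (the rewrite author's own statement) =====
-- stated objective: idiomatic
-- what changed: Replaces the per-call scan over nested category lists with a literal flat inverted feature->category dict and one direct .get lookup; the nested table and its loop disappear.
import Mathlib
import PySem

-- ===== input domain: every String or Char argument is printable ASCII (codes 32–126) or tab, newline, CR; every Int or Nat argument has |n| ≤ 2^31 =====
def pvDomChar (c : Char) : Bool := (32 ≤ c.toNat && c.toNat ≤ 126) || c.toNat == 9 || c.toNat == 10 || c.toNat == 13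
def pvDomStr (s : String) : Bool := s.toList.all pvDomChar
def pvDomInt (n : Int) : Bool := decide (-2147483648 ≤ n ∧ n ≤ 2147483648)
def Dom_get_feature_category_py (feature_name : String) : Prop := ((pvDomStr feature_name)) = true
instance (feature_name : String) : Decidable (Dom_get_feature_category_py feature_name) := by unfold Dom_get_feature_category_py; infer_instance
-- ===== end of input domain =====

-- B replaces A's per-call scan over nested category lists with a single lookup in a
-- literal flat feature->category dict (idiomatic; no per-call loop over the table).


-- ===== PORT A =====
-- A's category table, in dict insertion order.
def pvCategoriesA : List (String × List String) :=
  [ ("email_header",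
      ["spf_pass", "dkim_pass", "dmarc_pass", "reply_to_mismatch",
       "return_path_mismatch", "sender_domain_mismatch", "originating_ip_present",
       "num_received_headers", "smtp_hops", "ip_private_network"]),
    ("url_structural",
      ["url_length", "num_dots", "num_subdomains", "num_hyphens",
       "num_special_chars", "contains_ip_address", "contains_at_symbol",
       "num_query_parameters", "url_entropy_score", "num_fragments",
       "has_https", "url_shortened"]),
    ("url_obfuscation",
      ["percent_encoding_count", "hex_encoding_count", "double_slash_redirect",
       "encoded_characters_ratio", "username_in_url", "mixed_case_domain",
       "long_query_string"]),
    ("threat_intelligence",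
      ["openphish_match", "phishtank_match", "urlhaus_match",
       "domain_blacklisted", "ip_blacklisted", "threat_confidence_score"]),
    ("nlp",
      ["urgency_keyword_count", "credential_request_keywords",
       "financial_request_keywords", "security_alert_keywords",
       "threat_language_score", "sentiment_score", "imperative_language_score"]),
    ("brand_impersonation",
      ["brand_keyword_present", "brand_domain_similarity_score",
       "brand_typosquat_distance", "brand_homograph_detected"]),
    ("attachment_risk",
      ["attachment_count", "has_executable_attachment",
       "has_script_attachment", "has_macro_document",
       "double_extension_detected", "archive_with_executable",
       "mime_mismatch_detected"]) ]

-- the 'for category, features in categories.items(): if feature_name in features: return category' loop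
def pvScanA (l : List (String × List String)) (feature_name : String) : String :=
  match l with
  | [] => "other"
  | (category, features) :: rest =>
      if features.contains feature_name then category else pvScanA rest feature_name

def get_feature_category_py (feature_name : String) : String :=
  pvScanA pvCategoriesA feature_name

-- ===== PORT B =====
-- B's literal inverted dict _FEATURE_TO_CATEGORY: feature name -> category
-- (53 distinct keys, so first-match lookup is the dict lookup).
def pvFeatureToCategory : List (String × String) :=
  [ ("spf_pass", "email_header"),
  ("dkim_pass", "email_header"),
  ("dmarc_pass", "email_header"),
  ("reply_to_mismatch", "email_header"),
  ("return_path_mismatch", "email_header"),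
  ("sender_domain_mismatch", "email_header"),
  ("originating_ip_present", "email_header"),
  ("num_received_headers", "email_header"),
  ("smtp_hops", "email_header"),
  ("ip_private_network", "email_header"),
  ("url_length", "url_structural"),
  ("num_dots", "url_structural"),
  ("num_subdomains", "url_structural"),
  ("num_hyphens", "url_structural"),
  ("num_special_chars", "url_structural"),
  ("contains_ip_address", "url_structural"),
  ("contains_at_symbol", "url_structural"),
  ("num_query_parameters", "url_structural"),
  ("url_entropy_score", "url_structural"),
  ("num_fragments", "url_structural"),
  ("has_https", "url_structural"),
  ("url_shortened", "url_structural"),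
  ("percent_encoding_count", "url_obfuscation"),
  ("hex_encoding_count", "url_obfuscation"),
  ("double_slash_redirect", "url_obfuscation"),
  ("encoded_characters_ratio", "url_obfuscation"),
  ("username_in_url", "url_obfuscation"),
  ("mixed_case_domain", "url_obfuscation"),
  ("long_query_string", "url_obfuscation"),
  ("openphish_match", "threat_intelligence"),
  ("phishtank_match", "threat_intelligence"),
  ("urlhaus_match", "threat_intelligence"),
  ("domain_blacklisted", "threat_intelligence"),
  ("ip_blacklisted", "threat_intelligence"),
  ("threat_confidence_score", "threat_intelligence"),
  ("urgency_keyword_count", "nlp"),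
  ("credential_request_keywords", "nlp"),
  ("financial_request_keywords", "nlp"),
  ("security_alert_keywords", "nlp"),
  ("threat_language_score", "nlp"),
  ("sentiment_score", "nlp"),
  ("imperative_language_score", "nlp"),
  ("brand_keyword_present", "brand_impersonation"),
  ("brand_domain_similarity_score", "brand_impersonation"),
  ("brand_typosquat_distance", "brand_impersonation"),
  ("brand_homograph_detected", "brand_impersonation"),
  ("attachment_count", "attachment_risk"),
  ("has_executable_attachment", "attachment_risk"),
  ("has_script_attachment", "attachment_risk"),
  ("has_macro_document", "attachment_risk"),
  ("double_extension_detected", "attachment_risk"),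
  ("archive_with_executable", "attachment_risk"),
  ("mime_mismatch_detected", "attachment_risk") ]

-- _FEATURE_TO_CATEGORY.get(feature_name, "other")
def get_feature_category_py_alt (feature_name : String) : String :=
  ((pvFeatureToCategory.lookup feature_name).getD "other")

-- ===== PRECONDITION & SPEC =====
def Spec_get_feature_category_py (feature_name : String) (out : String) : Prop := out = get_feature_category_py_alt feature_name
instance (feature_name : String) (out : String) : Decidable (Spec_get_feature_category_py feature_name out) := by unfold Spec_get_feature_category_py; infer_instance

-- ===== CLAIM (what is proved, stated in full; the proofs are below) =====
def Claim_equal_get_feature_category_py : Prop := ∀ (feature_name : String), Dom_get_feature_category_py feature_name → Spec_get_feature_category_py feature_name (get_feature_category_py feature_name)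

-- ===== LEMMAS AND PROOFS =====

-- first-match lookup in one inverted block: hit iff the name is in the block's feature list
theorem pv_lookup_block (c n : String) (fs : List String) (rest : List (String × String)) :
    ((fs.map (fun f => (f, c))) ++ rest).lookup n
      = if fs.contains n then some c else rest.lookup n := by
  induction fs with
  | nil => simp
  | cons f fs ih =>
      by_cases h : n = f
      · simp [h]
      · have hb : (n == f) = false := by simp [h]
        simp [List.lookup_cons, hb, ih, List.contains_eq_mem, h]

-- the scan over any category table equals first-match lookup in its inverted table
theorem pv_scan_eq_lookup (l : List (String × List String)) (n : String) :
    pvScanA l n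
      = ((l.flatMap (fun p => p.2.map (fun f => (f, p.1)))).lookup n).getD "other" := by
  induction l with
  | nil => simp [pvScanA]
  | cons p rest ih =>
      obtain ⟨c, fs⟩ := p
      simp only [pvScanA, List.flatMap_cons, pv_lookup_block]
      by_cases h : n ∈ fs <;> simp [h, ih, List.contains_eq_mem]

-- B's literal flat table is exactly the inversion of A's table
theorem pv_inverted_eq :
    pvCategoriesA.flatMap (fun p => p.2.map (fun f => (f, p.1))) = pvFeatureToCategory := rfl

-- ===== VERDICT (by name: the statement is the Claim_ definition above) =====
theorem get_feature_category_py_spec : Claim_equal_get_feature_category_py := by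
  intro n _
  show get_feature_category_py n = get_feature_category_py_alt n
  rw [get_feature_category_py, get_feature_category_py_alt, pv_scan_eq_lookup, pv_inverted_eq]
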